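-- pv_equiv track=rewrite | github.com/ZYH30/Causal-Uplift-Lab | getProxConAndRegVars.py | find_c_total
-- ===== SOURCE A (Python) =====
-- import collections
--
-- def get_ancestors(graph: dict, node: str) -> set:
--     """
--     获取一个节点的所有祖先（不包括节点自身）。
--     使用广度优先搜索 (BFS) 向上遍历父节点。
--
--     :param graph: 因果图 (子 -> [父])
--     :param node: 目标节点
--     :return: 包含所有祖先的集合
--     """
--     ancestors = set()
--     if node not in graph:
--         return ancestors # 如果节点不在图的键中，它没有父节点
--
--     queue = collections.deque(graph.get(node, [])) # 从直接父节点开始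
--     visited = set(graph.get(node, [])) # 跟踪已访问节点以避免重复
--
--     while queue:
--         current = queue.popleft()
--         if current not in ancestors:
--             ancestors.add(current)
--             # 获取当前节点的父节点
--             parents = graph.get(current, [])
--             for p in parents:
--                 if p not in visited:
--                     visited.add(p)
--                     queue.append(p)
--     return ancestors
--
-- def exists_directed_path_without(
--     start: str,
--     end: str,
--     block_node: str,
--     graph_adj: dict
-- ) -> bool:
--     """
--     使用 BFS 检查是否存在从 'start' 到 'end' 的有向路径，
--     且该路径 *不* 经过 'block_node'。
--     """
--     if start == end:
--         return True
--
--     queue = collections.deque([start])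
--     visited = {start}
--
--     while queue:
--         current = queue.popleft()
--
--         for neighbor in graph_adj.get(current, []):
--             if neighbor == end:
--                 return True # 找到了！
--
--             if neighbor == block_node:
--                 continue # 路径被阻断，停止这个分支
--
--             if neighbor not in visited:
--                 visited.add(neighbor)
--                 queue.append(neighbor)
--
--     return False # 未找到路径
--
-- def find_c_total(graph: dict, graph_adj: dict, t: str, y: str) -> set:
--     """
--     *已优化*：识别全部混杂集 C_Total。
--     使用高效的 BFS 路径检查，而非路径枚举。
--     """
--     an_t = get_ancestors(graph, t)
--     an_y = get_ancestors(graph, y)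
--     potential_confounders = an_t.intersection(an_y)
--
--     c_total = set()
--
--     for c in potential_confounders:
--         # *优化点*：使用 O(V+E) 的 BFS 检查，替换 find_all_directed_paths
--         if exists_directed_path_without(c, y, t, graph_adj):
--             # 这不是一个纯工具变量，它是一个真正的混杂变量
--             c_total.add(c)
--
--     return c_total
-- ===== SOURCE B (Python) =====
-- import collections
--
-- def _ancestors(graph: dict, node: str) -> set:
--     # same BFS over parent links as the original helper
--     ancestors = set()
--     if node not in graph:
--         return ancestors
--     queue = collections.deque(graph.get(node, []))
--     visited = set(graph.get(node, []))
--     while queue: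
--         current = queue.popleft()
--         if current not in ancestors:
--             ancestors.add(current)
--             for p in graph.get(current, []):
--                 if p not in visited:
--                     visited.add(p)
--                     queue.append(p)
--     return ancestors
--
-- def find_c_total(graph: dict, graph_adj: dict, t: str, y: str) -> set:
--     an_t = _ancestors(graph, t)
--     an_y = _ancestors(graph, y)
--     potential_confounders = an_t.intersection(an_y)
--
--     # Build the predecessor map once; a single reverse BFS from y then marks
--     # every node with a directed path to y whose intermediate nodes avoid t.
--     edges = [(v, u) for u, ns in graph_adj.items() for v in ns]
--     preds = {}
--     for v, u in edges:
--         preds.setdefault(v, []).append(u)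
--
--     reach = {y}
--     queue = collections.deque([y])
--     while queue:
--         u = queue.popleft()
--         if u == y or u != t:
--             for v in preds.get(u, []):
--                 if v not in reach:
--                     reach.add(v)
--                     queue.append(v)
--
--     return {c for c in potential_confounders if c in reach}
-- ===== Notes on version B (the rewrite author's own statement) =====
-- stated objective: alternative
-- what changed: A runs a separate forward BFS path check (avoiding t) from every potential confounder to y; B builds a predecessor map once and does a single reverse BFS from y (not expanding through t), then keeps the potential confounders that were marked reachable; Pre_ only excludes association lists giving graph_adj duplicate keys, which represent no Python dict.
import Mathlib
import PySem

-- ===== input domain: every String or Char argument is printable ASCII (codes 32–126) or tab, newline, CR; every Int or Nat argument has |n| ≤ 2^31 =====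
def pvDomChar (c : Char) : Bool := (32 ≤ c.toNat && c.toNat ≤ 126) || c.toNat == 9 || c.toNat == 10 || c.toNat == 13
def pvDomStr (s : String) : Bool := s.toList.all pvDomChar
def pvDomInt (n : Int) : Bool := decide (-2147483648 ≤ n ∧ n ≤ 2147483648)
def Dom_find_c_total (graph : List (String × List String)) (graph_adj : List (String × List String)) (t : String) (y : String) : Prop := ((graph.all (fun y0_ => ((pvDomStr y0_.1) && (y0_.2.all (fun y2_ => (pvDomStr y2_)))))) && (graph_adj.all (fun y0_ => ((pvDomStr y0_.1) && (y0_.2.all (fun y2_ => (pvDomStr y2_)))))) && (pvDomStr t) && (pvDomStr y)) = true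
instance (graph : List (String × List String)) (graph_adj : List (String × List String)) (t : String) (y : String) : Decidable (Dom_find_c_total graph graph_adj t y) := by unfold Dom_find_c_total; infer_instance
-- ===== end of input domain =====

-- B replaces A's per-candidate forward BFS path check with ONE reverse BFS from y
-- over a predecessor map built once (objective: alternative — one traversal instead
-- of one per potential confounder); the ancestor computation is shared unchanged.

-- ===== PORT A =====
-- dict lookup graph.get(v, []) (first match, as a Python dict)
def pvGetNs (d : List (String × List String)) (v : String) : List String :=
  (PySem.Dict.mk d).getD v []

-- total number of adjacency-list entries (used only to size the loop fuel)
def pvEdges (d : List (String × List String)) : Nat :=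
  (d.flatMap (fun p => p.2)).length

-- shared inner loop "for x in xs: if x not in seen: seen.add(x); queue.append(x)"
def pvVisit : List String → PySem.Set String × List String → PySem.Set String × List String
  | [], s => s
  | x :: xs, (seen, q) =>
    if PySem.Set.contains seen x then pvVisit xs (seen, q)
    else pvVisit xs (PySem.Set.add seen x, q ++ [x])

-- 'while queue' loop of get_ancestors (fuel bounds the number of iterations; the
-- chosen fuel provably exceeds the number of dequeues, so it never runs out)
def ancLoop (graph : List (String × List String)) :
    Nat → List String → PySem.Set String → PySem.Set String → PySem.Set String
  | 0, _, _, anc => anc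
  | _ + 1, [], _, anc => anc
  | f + 1, cur :: q, vis, anc =>
    if PySem.Set.contains anc cur then ancLoop graph f q vis anc
    else
      let s := pvVisit (pvGetNs graph cur) (vis, q)
      ancLoop graph f s.2 s.1 (PySem.Set.add anc cur)

def get_ancestors (graph : List (String × List String)) (node : String) : PySem.Set String :=
  if (PySem.Dict.mk graph).contains node then
    let parents := pvGetNs graph node
    ancLoop graph (parents.length + pvEdges graph + 1) parents (PySem.Set.ofList parents) PySem.Set.empty
  else PySem.Set.empty

-- inner "for neighbor in graph_adj.get(current, [])" loop; none = 'return True'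
def epStep (fin blk : String) : List String → PySem.Set String × List String → Option (PySem.Set String × List String)
  | [], s => some s
  | n :: ns, (vis, q) =>
    if n = fin then none
    else if n = blk then epStep fin blk ns (vis, q)
    else if PySem.Set.contains vis n then epStep fin blk ns (vis, q)
    else epStep fin blk ns (PySem.Set.add vis n, q ++ [n])

-- 'while queue' loop of exists_directed_path_without
def epLoop (adjd : List (String × List String)) (fin blk : String) :
    Nat → List String → PySem.Set String → Bool
  | 0, _, _ => false
  | _ + 1, [], _ => false
  | f + 1, cur :: q, vis =>
    match epStep fin blk (pvGetNs adjd cur) (vis, q) with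
    | none => true
    | some (vis', q') => epLoop adjd fin blk f q' vis'

def exists_directed_path_without (start fin blk : String) (adjd : List (String × List String)) : Bool :=
  if start = fin then true
  else epLoop adjd fin blk (pvEdges adjd + 2) [start] (PySem.Set.ofList [start])

def find_c_total (graph : List (String × List String)) (graph_adj : List (String × List String)) (t : String) (y : String) : List String :=
  let an_t := get_ancestors graph t
  let an_y := get_ancestors graph y
  let pot := PySem.Set.inter an_t an_y
  pot.foldl (fun acc c => if exists_directed_path_without c y t graph_adj then PySem.Set.add acc c else acc) PySem.Set.empty

-- ===== PORT B =====
-- edges as (target, source) pairs: [(v, u) for u, ns in graph_adj.items() for v in ns]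
def pvEdgePairs (d : List (String × List String)) : List (String × String) :=
  d.flatMap (fun p => p.2.map (fun v => (v, p.1)))

-- preds = {}; for v, u in edges: preds.setdefault(v, []).append(u)
def buildPreds (d : List (String × List String)) : PySem.Dict String (List String) :=
  (pvEdgePairs d).foldl (fun m e => m.modify e.1 [] (· ++ [e.2])) PySem.Dict.empty

-- single reverse BFS from y: pop u; expand its predecessors unless u would be a
-- blocked intermediate node (u ≠ y and u = t)
def rbLoop (preds : PySem.Dict String (List String)) (t y : String) :
    Nat → List String → PySem.Set String → PySem.Set String
  | 0, _, r => r
  | _ + 1, [], r => r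
  | f + 1, u :: q, r =>
    if u = y ∨ u ≠ t then
      let s := pvVisit (preds.getD u []) (r, q)
      rbLoop preds t y f s.2 s.1
    else rbLoop preds t y f q r

def find_c_total_alt (graph : List (String × List String)) (graph_adj : List (String × List String)) (t : String) (y : String) : List String :=
  let an_t := get_ancestors graph t
  let an_y := get_ancestors graph y
  let pot := PySem.Set.inter an_t an_y
  let preds := buildPreds graph_adj
  let reach := rbLoop preds t y (pvEdges graph_adj + 2) [y] (PySem.Set.ofList [y])
  pot.foldl (fun acc c => if PySem.Set.contains reach c then PySem.Set.add acc c else acc) PySem.Set.empty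

-- ===== PRECONDITION & SPEC =====
-- Pre_ excludes association lists that give graph_adj duplicate keys: they represent
-- no Python dict (dict keys are unique), and A reads such a list by first-match
-- lookup while B iterates every entry. Every real dict input is admitted.
def Pre_find_c_total (_graph : List (String × List String)) (graph_adj : List (String × List String)) (_t : String) (_y : String) : Prop :=
  (graph_adj.map Prod.fst).Nodup
instance (graph : List (String × List String)) (graph_adj : List (String × List String)) (t : String) (y : String) : Decidable (Pre_find_c_total graph graph_adj t y) := by unfold Pre_find_c_total; infer_instance

def pvWitness_find_c_total : (List (String × List String)) × (List (String × List String)) × String × String :=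
  ([("y", ["c"]), ("t", ["c"])], [("c", ["t", "y"])], "t", "y")

def Spec_find_c_total (graph : List (String × List String)) (graph_adj : List (String × List String)) (t : String) (y : String) (out : List String) : Prop := out = find_c_total_alt graph graph_adj t y
instance (graph : List (String × List String)) (graph_adj : List (String × List String)) (t : String) (y : String) (out : List String) : Decidable (Spec_find_c_total graph graph_adj t y out) := by unfold Spec_find_c_total; infer_instance

-- ===== CLAIM (what is proved, stated in full; the proofs are below) =====
def Claim_equal_find_c_total : Prop := ∀ (graph : List (String × List String)) (graph_adj : List (String × List String)) (t : String) (y : String), Dom_find_c_total graph graph_adj t y → Pre_find_c_total graph graph_adj t y → Spec_find_c_total graph graph_adj t y (find_c_total graph graph_adj t y)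

-- ===== LEMMAS AND PROOFS =====

-- chains v → … → u along adjd whose nodes after v avoid t
inductive PvSteps (adj : String → List String) (t : String) : String → String → Prop
  | refl (v : String) : PvSteps adj t v v
  | head {v w u : String} : w ∈ adj v → w ≠ t → PvSteps adj t w u → PvSteps adj t v u

theorem PvSteps.tail {adj : String → List String} {t v u w : String}
    (h : PvSteps adj t v u) (hw : w ∈ adj u) (hwt : w ≠ t) : PvSteps adj t v w := by
  induction h with
  | refl v => exact PvSteps.head hw hwt (PvSteps.refl w)
  | head h1 h2 _ ih => exact PvSteps.head h1 h2 (ih hw)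

theorem mem_pvGetNs_subset {d : List (String × List String)} {c x : String}
    (h : x ∈ pvGetNs d c) : x ∈ d.flatMap (fun p => p.2) := by
  induction d with
  | nil => rw [pvGetNs, PySem.Dict.getD_eq_get?_getD] at h; simp [PySem.Dict.get?] at h
  | cons p rest ih =>
    obtain ⟨k, vs⟩ := p
    rw [pvGetNs, PySem.Dict.getD_eq_get?_getD, PySem.Dict.get?_mk_cons] at h
    by_cases hk : (k == c) = true
    · simp [hk] at h; simp [List.mem_flatMap]; exact Or.inl h
    · simp [hk] at h
      have := ih (by rw [pvGetNs, PySem.Dict.getD_eq_get?_getD]; exact h)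
      simp [List.mem_flatMap] at this ⊢; exact Or.inr this
theorem filter_length_add (U r : List String) (v : String) (hU : U.Nodup) (hv : v ∈ U) (hvr : v ∉ r) :
    (U.filter (fun x => !PySem.Set.contains (PySem.Set.add r v) x)).length + 1
      = (U.filter (fun x => !PySem.Set.contains r x)).length := by
  rw [PySem.Set.add_of_not_mem hvr]
  have hpred : (fun x => !PySem.Set.contains (r ++ [v]) x)
      = (fun x => (x != v) && (!PySem.Set.contains r x)) := by
    funext x
    simp only [PySem.Set.contains, List.contains_append, Bool.not_or]
    by_cases hxv : x = v <;> simp [hxv]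
  rw [hpred, ← List.filter_filter]
  set W := U.filter (fun x => !PySem.Set.contains r x) with hW
  have hWnd : W.Nodup := hU.filter _
  have hvW : v ∈ W := by
    rw [hW, List.mem_filter]
    refine ⟨hv, ?_⟩
    simp [PySem.Set.contains]
    exact hvr
  rw [← hWnd.erase_eq_filter v, List.length_erase_of_mem hvW]
  have := List.length_pos_of_mem hvW
  omega
theorem pvVisit_spec (vs : List String) :
    ∀ (r q r' q' : List String), pvVisit vs (r, q) = (r', q') →
    (∀ x ∈ r, x ∈ r') ∧
    (∀ x ∈ r', x ∈ r ∨ x ∈ vs) ∧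
    (∀ x ∈ vs, x ∈ r') ∧
    (∀ x ∈ q', x ∈ q ∨ x ∈ r') ∧
    (∀ x ∈ q, x ∈ q') ∧
    (∀ x ∈ r', x ∈ r ∨ x ∈ q') ∧
    (r.Nodup → r'.Nodup) ∧
    (∀ U : List String, U.Nodup → (∀ x ∈ vs, x ∈ U) →
      q'.length + (U.filter (fun x => !PySem.Set.contains r' x)).length ≤
      q.length + (U.filter (fun x => !PySem.Set.contains r x)).length) := by
  induction vs with
  | nil =>
    intro r q r' q' h
    rw [pvVisit] at h
    obtain ⟨rfl, rfl⟩ := Prod.mk.injEq .. ▸ h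
    refine ⟨fun x hx => hx, fun x hx => Or.inl hx, by simp, fun x hx => Or.inl hx,
      fun x hx => hx, fun x hx => Or.inl hx, id, fun U _ _ => le_refl _⟩
  | cons v vs ih =>
    intro r q r' q' h
    rw [pvVisit] at h
    by_cases hvr : PySem.Set.contains r v
    · rw [if_pos hvr] at h
      have hv_mem : v ∈ r := (PySem.Set.contains_iff r v).mp hvr
      obtain ⟨h1, h2, h3, h4, h5, h6, h7, h8⟩ := ih r q r' q' h
      refine ⟨h1, ?_, ?_, h4, h5, h6, h7,
        fun U hU hsub => h8 U hU (fun x hx => hsub x (List.mem_cons_of_mem _ hx))⟩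
      · intro x hx; rcases h2 x hx with h | h
        · exact Or.inl h
        · exact Or.inr (List.mem_cons_of_mem _ h)
      · intro x hx; rcases List.mem_cons.mp hx with rfl | hx
        · exact h1 x hv_mem
        · exact h3 x hx
    · rw [if_neg hvr] at h
      have hv_not : v ∉ r := fun hm => hvr ((PySem.Set.contains_iff r v).mpr hm)
      obtain ⟨h1, h2, h3, h4, h5, h6, h7, h8⟩ := ih (PySem.Set.add r v) (q ++ [v]) r' q' h
      rw [PySem.Set.add_of_not_mem hv_not] at h1 h2 h6
      have hvr' : v ∈ r' := h1 v (by simp)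
      refine ⟨?_, ?_, ?_, ?_, ?_, ?_, ?_, ?_⟩
      · intro x hx; exact h1 x (by simp [hx])
      · intro x hx; rcases h2 x hx with h | h
        · rcases List.mem_append.mp h with h | h
          · exact Or.inl h
          · exact Or.inr (by simp at h; simp [h])
        · exact Or.inr (List.mem_cons_of_mem _ h)
      · intro x hx; rcases List.mem_cons.mp hx with rfl | hx
        · exact hvr'
        · exact h3 x hx
      · intro x hx; rcases h4 x hx with h | h
        · rcases List.mem_append.mp h with h | h
          · exact Or.inl h
          · simp at h; exact Or.inr (h ▸ hvr')
        · exact Or.inr h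
      · intro x hx; exact h5 x (List.mem_append.mpr (Or.inl hx))
      · intro x hx; rcases h6 x hx with h | h
        · rcases List.mem_append.mp h with h | h
          · exact Or.inl h
          · simp at h; exact Or.inr (h ▸ h5 v (by simp))
        · exact Or.inr h
      · intro hnd; exact h7 ((PySem.Set.add_of_not_mem hv_not) ▸ PySem.Set.nodup_add r v hnd)
      · intro U hU hsub
        have hstep := h8 U hU (fun x hx => hsub x (List.mem_cons_of_mem _ hx))
        have heq := filter_length_add U r v hU (hsub v (by simp)) hv_not
        simp only [List.length_append, List.length_cons, List.length_nil] at hstep ⊢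
        omega
theorem epStep_none_iff (fin blk : String) (ns : List String) :
    ∀ vis q, epStep fin blk ns (vis, q) = none ↔ fin ∈ ns := by
  induction ns with
  | nil => intro vis q; simp [epStep]
  | cons n ns ih =>
    intro vis q
    rw [epStep]
    by_cases hf : n = fin
    · simp [hf]
    · rw [if_neg hf]
      by_cases hb : n = blk
      · rw [if_pos hb, ih]
        simp [List.mem_cons, Ne.symm hf]
      · rw [if_neg hb]
        by_cases hv : PySem.Set.contains vis n
        · rw [if_pos hv, ih]
          simp only [List.mem_cons]
          exact ⟨Or.inr, fun h => h.resolve_left (fun h' => hf h'.symm)⟩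
        · rw [if_neg hv, ih]
          simp only [List.mem_cons]
          exact ⟨Or.inr, fun h => h.resolve_left (fun h' => hf h'.symm)⟩
theorem epStep_some_spec (fin blk : String) (ns : List String) :
    ∀ vis q vis' q', epStep fin blk ns (vis, q) = some (vis', q') →
    (∀ x ∈ vis, x ∈ vis') ∧
    (∀ x ∈ vis', x ∈ vis ∨ (x ∈ ns ∧ x ≠ blk)) ∧
    (∀ x ∈ ns, x = blk ∨ x ∈ vis') ∧
    (∀ x ∈ q', x ∈ q ∨ x ∈ vis') ∧
    (∀ x ∈ q, x ∈ q') ∧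
    (∀ x ∈ vis', x ∈ vis ∨ x ∈ q') ∧
    (vis.Nodup → vis'.Nodup) ∧
    (∀ U : List String, U.Nodup → (∀ x ∈ ns, x ∈ U) →
      q'.length + (U.filter (fun x => !PySem.Set.contains vis' x)).length ≤
      q.length + (U.filter (fun x => !PySem.Set.contains vis x)).length) := by
  induction ns with
  | nil =>
    intro vis q vis' q' h
    rw [epStep] at h
    obtain ⟨rfl, rfl⟩ := Prod.mk.injEq .. ▸ Option.some.injEq .. ▸ h
    exact ⟨fun x hx => hx, fun x hx => Or.inl hx, by simp, fun x hx => Or.inl hx,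
      fun x hx => hx, fun x hx => Or.inl hx, id, fun U _ _ => le_refl _⟩
  | cons n ns ih =>
    intro vis q vis' q' h
    rw [epStep] at h
    by_cases hf : n = fin
    · rw [if_pos hf] at h; exact absurd h (by simp)
    · rw [if_neg hf] at h
      by_cases hb : n = blk
      · rw [if_pos hb] at h
        obtain ⟨h1, h2, h3, h4, h5, h6, h7, h8⟩ := ih vis q vis' q' h
        refine ⟨h1, ?_, ?_, h4, h5, h6, h7,
          fun U hU hsub => h8 U hU (fun x hx => hsub x (List.mem_cons_of_mem _ hx))⟩
        · intro x hx; rcases h2 x hx with hx' | hx'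
          · exact Or.inl hx'
          · exact Or.inr ⟨List.mem_cons_of_mem _ hx'.1, hx'.2⟩
        · intro x hx; rcases List.mem_cons.mp hx with rfl | hx'
          · exact Or.inl hb
          · exact h3 x hx'
      · rw [if_neg hb] at h
        by_cases hv : PySem.Set.contains vis n
        · rw [if_pos hv] at h
          have hn_mem : n ∈ vis := (PySem.Set.contains_iff vis n).mp hv
          obtain ⟨h1, h2, h3, h4, h5, h6, h7, h8⟩ := ih vis q vis' q' h
          refine ⟨h1, ?_, ?_, h4, h5, h6, h7,
            fun U hU hsub => h8 U hU (fun x hx => hsub x (List.mem_cons_of_mem _ hx))⟩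
          · intro x hx; rcases h2 x hx with hx' | hx'
            · exact Or.inl hx'
            · exact Or.inr ⟨List.mem_cons_of_mem _ hx'.1, hx'.2⟩
          · intro x hx; rcases List.mem_cons.mp hx with rfl | hx'
            · exact Or.inr (h1 x hn_mem)
            · exact h3 x hx'
        · rw [if_neg hv] at h
          have hn_not : n ∉ vis := fun hm => hv ((PySem.Set.contains_iff vis n).mpr hm)
          obtain ⟨h1, h2, h3, h4, h5, h6, h7, h8⟩ := ih (PySem.Set.add vis n) (q ++ [n]) vis' q' h
          rw [PySem.Set.add_of_not_mem hn_not] at h1 h2 h6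
          have hnr' : n ∈ vis' := h1 n (by simp)
          refine ⟨?_, ?_, ?_, ?_, ?_, ?_, ?_, ?_⟩
          · intro x hx; exact h1 x (by simp [hx])
          · intro x hx; rcases h2 x hx with hx' | hx'
            · rcases List.mem_append.mp hx' with hx'' | hx''
              · exact Or.inl hx''
              · simp at hx''; subst hx''; exact Or.inr ⟨by simp, hb⟩
            · exact Or.inr ⟨List.mem_cons_of_mem _ hx'.1, hx'.2⟩
          · intro x hx; rcases List.mem_cons.mp hx with rfl | hx'
            · exact Or.inr hnr'
            · exact h3 x hx'
          · intro x hx; rcases h4 x hx with hx' | hx'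
            · rcases List.mem_append.mp hx' with hx'' | hx''
              · exact Or.inl hx''
              · simp at hx''; exact Or.inr (hx'' ▸ hnr')
            · exact Or.inr hx'
          · intro x hx; exact h5 x (List.mem_append.mpr (Or.inl hx))
          · intro x hx; rcases h6 x hx with hx' | hx'
            · rcases List.mem_append.mp hx' with hx'' | hx''
              · exact Or.inl hx''
              · simp at hx''; exact Or.inr (hx'' ▸ h5 n (by simp))
            · exact Or.inr hx'
          · intro hnd; exact h7 ((PySem.Set.add_of_not_mem hn_not) ▸ PySem.Set.nodup_add vis n hnd)
          · intro U hU hsub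
            have hstep := h8 U hU (fun x hx => hsub x (List.mem_cons_of_mem _ hx))
            have heq := filter_length_add U vis n hU (hsub n (by simp)) hn_not
            simp only [List.length_append, List.length_cons, List.length_nil] at hstep ⊢
            omega
theorem closedA (adj : String → List String) (fin blk : String) (vis : List String)
    (hcl : ∀ x ∈ vis, ∀ w ∈ adj x, w ≠ fin ∧ (w = blk ∨ w ∈ vis)) :
    ∀ v u, PvSteps adj blk v u → v ∈ vis → u ∈ vis ∧ fin ∉ adj u := by
  intro v u h
  induction h with
  | refl v => exact fun hv => ⟨hv, fun hf => (hcl v hv fin hf).1 rfl⟩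
  | head h1 h2 _ ih =>
    intro hv
    have := hcl _ hv _ h1
    exact ih (this.2.resolve_left h2)
theorem epLoop_true (adjd : List (String × List String)) (fin blk start : String) :
    ∀ f q vis, epLoop adjd fin blk f q vis = true →
    (∀ x ∈ q, x ∈ vis) →
    (∀ x ∈ vis, PvSteps (pvGetNs adjd) blk start x) →
    ∃ u, PvSteps (pvGetNs adjd) blk start u ∧ fin ∈ pvGetNs adjd u := by
  intro f
  induction f with
  | zero => intro q vis h; rw [epLoop] at h; exact absurd h (by simp)
  | succ f ih =>
    intro q vis h hq hvis
    match q with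
    | [] => rw [epLoop] at h; exact absurd h (by simp)
    | cur :: rest =>
      rw [epLoop] at h
      rcases hstep : epStep fin blk (pvGetNs adjd cur) (vis, rest) with _ | ⟨vis', q'⟩
      · exact ⟨cur, hvis cur (hq cur (by simp)), (epStep_none_iff fin blk _ vis rest).mp hstep⟩
      · rw [hstep] at h
        obtain ⟨h1, h2, h3, h4, h5, h6, h7, h8⟩ := epStep_some_spec fin blk _ vis rest vis' q' hstep
        refine ih q' vis' h ?_ ?_
        · intro x hx
          rcases h4 x hx with hx' | hx'
          · exact h1 x (hq x (List.mem_cons_of_mem _ hx'))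
          · exact hx'
        · intro x hx
          rcases h2 x hx with hx' | hx'
          · exact hvis x hx'
          · exact PvSteps.tail (hvis cur (hq cur (by simp))) hx'.1 hx'.2
theorem epLoop_false (adjd : List (String × List String)) (fin blk : String)
    (U : List String) (hU : U.Nodup) (hadj : ∀ c, ∀ x ∈ pvGetNs adjd c, x ∈ U) :
    ∀ f q vis, epLoop adjd fin blk f q vis = false →
    vis.Nodup →
    (∀ x ∈ q, x ∈ vis) →
    (∀ x ∈ vis, x ∈ q ∨ (∀ w ∈ pvGetNs adjd x, w ≠ fin ∧ (w = blk ∨ w ∈ vis))) →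
    q.length + (U.filter (fun x => !PySem.Set.contains vis x)).length ≤ f →
    ∀ v u, PvSteps (pvGetNs adjd) blk v u → v ∈ vis → fin ∉ pvGetNs adjd u := by
  intro f
  induction f with
  | zero =>
    intro q vis _ _ _ hinv hfuel
    have hq : q = [] := List.length_eq_zero_iff.mp (by omega)
    subst hq
    exact fun v u hs hv =>
      (closedA (pvGetNs adjd) fin blk vis (fun x hx => (hinv x hx).resolve_left (by simp)) v u hs hv).2
  | succ f ih =>
    intro q vis h hnd hq hinv hfuel
    match q with
    | [] =>
      exact fun v u hs hv =>
        (closedA (pvGetNs adjd) fin blk vis (fun x hx => (hinv x hx).resolve_left (by simp)) v u hs hv).2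
    | cur :: rest =>
      rw [epLoop] at h
      rcases hstep : epStep fin blk (pvGetNs adjd cur) (vis, rest) with _ | ⟨vis', q'⟩
      · rw [hstep] at h; exact absurd h (by simp)
      · rw [hstep] at h
        obtain ⟨h1, h2, h3, h4, h5, h6, h7, h8⟩ := epStep_some_spec fin blk _ vis rest vis' q' hstep
        have hfin_not : fin ∉ pvGetNs adjd cur := fun hm =>
          by rw [(epStep_none_iff fin blk _ vis rest).mpr hm] at hstep; exact absurd hstep (by simp)
        have main := ih q' vis' h (h7 hnd)
          (fun x hx => (h4 x hx).elim (fun hx' => h1 x (hq x (List.mem_cons_of_mem _ hx'))) id)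
          ?_ ?_
        · exact fun v u hs hv => main v u hs (h1 v hv)

        · -- closure invariant for vis'
          intro x hx
          rcases h2 x hx with hx' | hx'
          · rcases hinv x hx' with hx'' | hx''
            · rcases List.mem_cons.mp hx'' with rfl | hx''
              · refine Or.inr (fun w hw => ⟨fun he => hfin_not (he ▸ hw), ?_⟩)
                exact h3 w hw
              · exact Or.inl (h5 x hx'')
            · exact Or.inr (fun w hw => ⟨(hx'' w hw).1, (hx'' w hw).2.imp_right (h1 w)⟩)
          · rcases h6 x hx with hx'' | hx''
            · rcases hinv x hx'' with hx3 | hx3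
              · rcases List.mem_cons.mp hx3 with rfl | hx3
                · exact Or.inr (fun w hw => ⟨fun he => hfin_not (he ▸ hw), h3 w hw⟩)
                · exact Or.inl (h5 x hx3)
              · exact Or.inr (fun w hw => ⟨(hx3 w hw).1, (hx3 w hw).2.imp_right (h1 w)⟩)
            · exact Or.inl hx''
        · -- fuel
          have hstep8 := h8 U hU (fun x hx => hadj cur x hx)
          simp only [List.length_cons] at hfuel
          omega
theorem ep_iff (adjd : List (String × List String)) (fin blk c : String) :
    exists_directed_path_without c fin blk adjd = true ↔
    (c = fin ∨ ∃ u, PvSteps (pvGetNs adjd) blk c u ∧ fin ∈ pvGetNs adjd u) := by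
  rw [exists_directed_path_without]
  by_cases hc : c = fin
  · simp [hc]
  · rw [if_neg hc]
    have hofl : PySem.Set.ofList [c] = [c] := rfl
    rcases h : epLoop adjd fin blk (pvEdges adjd + 2) [c] (PySem.Set.ofList [c]) with _ | _
    · simp only [Bool.false_eq_true, false_iff]
      rintro (hcf | ⟨u, hsteps, hfin⟩)
      · exact hc hcf
      · rw [hofl] at h
        have hUnd : ((adjd.flatMap (fun p => p.2)).dedup).Nodup := List.nodup_dedup _
        have hadj : ∀ cc, ∀ x ∈ pvGetNs adjd cc, x ∈ (adjd.flatMap (fun p => p.2)).dedup :=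
          fun cc x hx => List.mem_dedup.mpr (mem_pvGetNs_subset hx)
        have hfuel : ([c] : List String).length +
            (((adjd.flatMap (fun p => p.2)).dedup).filter
              (fun x => !PySem.Set.contains [c] x)).length ≤ pvEdges adjd + 2 := by
          have h1 : (((adjd.flatMap (fun p => p.2)).dedup).filter
              (fun x => !PySem.Set.contains [c] x)).length ≤ ((adjd.flatMap (fun p => p.2)).dedup).length :=
            List.length_filter_le _ _
          have h2 : ((adjd.flatMap (fun p => p.2)).dedup).length ≤ (adjd.flatMap (fun p => p.2)).length :=
            (List.dedup_sublist _).length_le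
          simp only [List.length_cons, List.length_nil, pvEdges]
          omega
        exact epLoop_false adjd fin blk _ hUnd hadj _ [c] [c] h (by simp)
          (by simp) (fun x hx => Or.inl hx) hfuel c u hsteps (by simp) hfin
    · simp only [true_iff]
      rw [hofl] at h
      refine Or.inr (epLoop_true adjd fin blk c _ [c] [c] h (fun x hx => hx) ?_)
      intro x hx
      rcases List.mem_cons.mp hx with rfl | hx
      · exact PvSteps.refl x
      · simp at hx
theorem predsOf_eq (d : List (String × List String)) (u : String) :
    (buildPreds d).getD u [] = ((pvEdgePairs d).filter (fun p => p.1 == u)).map (·.2) := by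
  rw [buildPreds, PySem.Dict.getD_foldl_modify_append]
  simp only [PySem.Dict.getD_eq_get?_getD, PySem.Dict.empty]
  rw [show ((PySem.Dict.mk ([] : List (String × List String))).get? u).getD [] = [] from rfl]
  simp
theorem mem_pvGetNs_iff (d : List (String × List String)) (hk : (d.map Prod.fst).Nodup)
    (w x : String) : x ∈ pvGetNs d w ↔ ∃ p ∈ d, p.1 = w ∧ x ∈ p.2 := by
  induction d with
  | nil =>
    rw [pvGetNs, PySem.Dict.getD_eq_get?_getD]
    simp [PySem.Dict.get?]
  | cons p rest ih =>
    obtain ⟨k, vs⟩ := p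
    simp only [List.map_cons, List.nodup_cons] at hk
    rw [pvGetNs, PySem.Dict.getD_eq_get?_getD, PySem.Dict.get?_mk_cons]
    by_cases hkw : (k == w) = true
    · have hkw' : k = w := by simpa using hkw
      simp only [hkw, if_pos]
      constructor
      · intro h; exact ⟨(k, vs), by simp, hkw', by simpa using h⟩
      · rintro ⟨q, hq, hq1, hq2⟩
        rcases List.mem_cons.mp hq with h | h
        · subst h; simpa using hq2
        · exact absurd (List.mem_map.mpr ⟨q, h, hq1.trans hkw'.symm⟩) hk.1
    · have hkw' : ¬ k = w := by simpa using hkw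
      simp only [hkw, if_neg, Bool.false_eq_true, not_false_iff]
      rw [show (Option.getD ((PySem.Dict.mk rest).get? w) []) = pvGetNs rest w from
        (by rw [pvGetNs, PySem.Dict.getD_eq_get?_getD]), ih hk.2]
      constructor
      · rintro ⟨q, hq, h1, h2⟩; exact ⟨q, List.mem_cons_of_mem _ hq, h1, h2⟩
      · rintro ⟨q, hq, h1, h2⟩
        rcases List.mem_cons.mp hq with h | h
        · exfalso; apply hkw'; rw [← h1, h]
        · exact ⟨q, h, h1, h2⟩
theorem mem_predsOf_iff (d : List (String × List String)) (hk : (d.map Prod.fst).Nodup)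
    (u w : String) : w ∈ (buildPreds d).getD u [] ↔ u ∈ pvGetNs d w := by
  rw [predsOf_eq, mem_pvGetNs_iff d hk]
  simp only [List.mem_map, List.mem_filter, pvEdgePairs, List.mem_flatMap]
  constructor
  · rintro ⟨e, ⟨⟨p, hp, v0, hv0, rfl⟩, he1⟩, he2⟩
    have hv0u : v0 = u := by simpa using he1
    have hp1w : p.1 = w := by simpa using he2
    exact ⟨p, hp, hp1w, hv0u ▸ hv0⟩
  · rintro ⟨p, hp, h1, h2⟩
    exact ⟨(u, w), ⟨⟨p, hp, u, h2, by simp [h1]⟩, by simp⟩, rfl⟩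
theorem rbLoop_mono (preds : PySem.Dict String (List String)) (t y : String) :
    ∀ f q r x, x ∈ r → x ∈ rbLoop preds t y f q r := by
  intro f
  induction f with
  | zero => intro q r x hx; rw [rbLoop]; exact hx
  | succ f ih =>
    intro q r x hx
    match q with
    | [] => rw [rbLoop]; exact hx
    | u :: rest =>
      rw [rbLoop]
      by_cases hc : u = y ∨ u ≠ t
      · rw [if_pos hc]
        rcases hs : pvVisit (preds.getD u []) (r, rest) with ⟨r', q'⟩
        obtain ⟨h1, _, _, _, _, _, _, _⟩ := pvVisit_spec _ _ _ _ _ hs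
        exact ih q' r' x (h1 x hx)
      · rw [if_neg hc]; exact ih rest r x hx
theorem rbLoop_sound (preds : PySem.Dict String (List String)) (t y : String)
    (adj : String → List String)
    (hpred : ∀ u w, w ∈ preds.getD u [] → u ∈ adj w) :
    ∀ f q r, (∀ x ∈ q, x ∈ r) →
    (∀ x ∈ r, x = y ∨ ∃ u, PvSteps adj t x u ∧ y ∈ adj u) →
    ∀ x ∈ rbLoop preds t y f q r, x = y ∨ ∃ u, PvSteps adj t x u ∧ y ∈ adj u := by
  intro f
  induction f with
  | zero => intro q r _ hr x hx; rw [rbLoop] at hx; exact hr x hx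
  | succ f ih =>
    intro q r hq hr x hx
    match q with
    | [] => rw [rbLoop] at hx; exact hr x hx
    | u :: rest =>
      rw [rbLoop] at hx
      by_cases hc : u = y ∨ u ≠ t
      · rw [if_pos hc] at hx
        rcases hs : pvVisit (preds.getD u []) (r, rest) with ⟨r', q'⟩
        rw [hs] at hx
        obtain ⟨h1, h2, _, h4, h5, _, _, _⟩ := pvVisit_spec _ _ _ _ _ hs
        refine ih q' r' ?_ ?_ x hx
        · intro z hz
          rcases h4 z hz with hz' | hz'
          · exact h1 z (hq z (List.mem_cons_of_mem _ hz'))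
          · exact hz'
        · intro z hz
          rcases h2 z hz with hz' | hz'
          · exact hr z hz'
          · -- z is a predecessor of u
            have hzu : u ∈ adj z := hpred u z hz'
            by_cases huy : u = y
            · exact Or.inr ⟨z, PvSteps.refl z, huy ▸ hzu⟩
            · have hut : u ≠ t := hc.resolve_left huy
              rcases hr u (hq u (by simp)) with h | ⟨s, hsteps, hy⟩
              · exact absurd h huy
              · exact Or.inr ⟨s, PvSteps.head hzu hut hsteps, hy⟩
      · rw [if_neg hc] at hx
        exact ih rest r (fun z hz => hq z (List.mem_cons_of_mem _ hz)) hr x hx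
theorem closedB (adj : String → List String) (t y : String)
    (preds : PySem.Dict String (List String)) (r : List String)
    (hpred2 : ∀ u w, u ∈ adj w → w ∈ preds.getD u [])
    (hy : y ∈ r)
    (hcl : ∀ x ∈ r, (x = y ∨ x ≠ t) → ∀ w ∈ preds.getD x [], w ∈ r) :
    ∀ v u, PvSteps adj t v u → y ∈ adj u → v ∈ r := by
  intro v u h
  induction h with
  | refl v => exact fun hyv => hcl y hy (Or.inl rfl) v (hpred2 y v hyv)
  | head h1 h2 _ ih =>
    intro hyu
    exact hcl _ (ih hyu) (Or.inr h2) _ (hpred2 _ _ h1)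
theorem rbLoop_complete (preds : PySem.Dict String (List String)) (t y : String)
    (U : List String) (hU : U.Nodup) (hsub : ∀ c, ∀ x ∈ preds.getD c [], x ∈ U)
    (adj : String → List String)
    (hpred2 : ∀ u w, u ∈ adj w → w ∈ preds.getD u []) :
    ∀ f q r, r.Nodup → (∀ x ∈ q, x ∈ r) → y ∈ r →
    (∀ x ∈ r, x ∈ q ∨ ((x = y ∨ x ≠ t) → ∀ w ∈ preds.getD x [], w ∈ r)) →
    q.length + (U.filter (fun x => !PySem.Set.contains r x)).length ≤ f →
    ∀ v u, PvSteps adj t v u → y ∈ adj u → v ∈ rbLoop preds t y f q r := by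
  intro f
  induction f with
  | zero =>
    intro q r _ _ hy hinv hfuel v u hs hyu
    have hq : q = [] := List.length_eq_zero_iff.mp (by omega)
    subst hq
    rw [rbLoop]
    exact closedB adj t y preds r hpred2 hy
      (fun x hx => (hinv x hx).resolve_left (by simp)) v u hs hyu
  | succ f ih =>
    intro q r hnd hq hy hinv hfuel v u hs hyu
    match q with
    | [] =>
      rw [rbLoop]
      exact closedB adj t y preds r hpred2 hy
        (fun x hx => (hinv x hx).resolve_left (by simp)) v u hs hyu
    | w :: rest =>
      rw [rbLoop]
      by_cases hc : w = y ∨ w ≠ t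
      · rw [if_pos hc]
        rcases hstep : pvVisit (preds.getD w []) (r, rest) with ⟨r', q'⟩
        obtain ⟨h1, h2, h3, h4, h5, h6, h7, h8⟩ := pvVisit_spec _ _ _ _ _ hstep
        refine ih q' r' (h7 hnd)
          (fun z hz => (h4 z hz).elim (fun hz' => h1 z (hq z (List.mem_cons_of_mem _ hz'))) id)
          (h1 y hy) ?_ ?_ v u hs hyu
        · intro x hx
          rcases h2 x hx with hx' | hx'
          · rcases hinv x hx' with hx'' | hx''
            · rcases List.mem_cons.mp hx'' with rfl | hx''
              · exact Or.inr (fun _ w' hw' => h3 w' hw')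
              · exact Or.inl (h5 x hx'')
            · exact Or.inr (fun hcnd w' hw' => h1 w' (hx'' hcnd w' hw'))
          · rcases h6 x hx with hx'' | hx''
            · rcases hinv x hx'' with hx3 | hx3
              · rcases List.mem_cons.mp hx3 with rfl | hx3
                · exact Or.inr (fun _ w' hw' => h3 w' hw')
                · exact Or.inl (h5 x hx3)
              · exact Or.inr (fun hcnd w' hw' => h1 w' (hx3 hcnd w' hw'))
            · exact Or.inl hx''
        · have hstep8 := h8 U hU (fun x hx => hsub w x hx)
          simp only [List.length_cons] at hfuel
          omega
      · rw [if_neg hc]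
        refine ih rest r hnd (fun z hz => hq z (List.mem_cons_of_mem _ hz)) hy ?_ ?_ v u hs hyu
        · intro x hx
          rcases hinv x hx with hx' | hx'
          · rcases List.mem_cons.mp hx' with rfl | hx'
            · exact Or.inr (fun hcnd => absurd hcnd hc)
            · exact Or.inl hx'
          · exact Or.inr hx'
        · simp only [List.length_cons] at hfuel
          omega
theorem length_pvEdgePairs (d : List (String × List String)) :
    (pvEdgePairs d).length = pvEdges d := by
  simp [pvEdgePairs, pvEdges, List.length_flatMap]
theorem reach_iff (graph_adj : List (String × List String))
    (hk : (graph_adj.map Prod.fst).Nodup) (t y c : String) :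
    PySem.Set.contains (rbLoop (buildPreds graph_adj) t y (pvEdges graph_adj + 2) [y] (PySem.Set.ofList [y])) c = true
    ↔ (c = y ∨ ∃ u, PvSteps (pvGetNs graph_adj) t c u ∧ y ∈ pvGetNs graph_adj u) := by
  have hofl : PySem.Set.ofList [y] = [y] := rfl
  rw [hofl, PySem.Set.contains_iff]
  constructor
  · intro hmem
    exact rbLoop_sound (buildPreds graph_adj) t y (pvGetNs graph_adj)
      (fun u w hw => (mem_predsOf_iff graph_adj hk u w).mp hw)
      _ [y] [y] (fun x hx => hx)
      (fun x hx => Or.inl (by simpa using hx)) c hmem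
  · intro h
    rcases h with rfl | ⟨u, hsteps, hyu⟩
    · exact rbLoop_mono _ t c _ [c] [c] c (by simp)
    · set UB := ((pvEdgePairs graph_adj).map (·.2)).dedup with hUB
      have hUnd : UB.Nodup := List.nodup_dedup _
      have hsub : ∀ cc, ∀ x ∈ (buildPreds graph_adj).getD cc [], x ∈ UB := by
        intro cc x hx
        rw [predsOf_eq] at hx
        rcases List.mem_map.mp hx with ⟨e, he, rfl⟩
        exact List.mem_dedup.mpr (List.mem_map.mpr ⟨e, (List.mem_filter.mp he).1, rfl⟩)
      have hfuel : ([y] : List String).length +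
          (UB.filter (fun x => !PySem.Set.contains [y] x)).length ≤ pvEdges graph_adj + 2 := by
        have h1 : (UB.filter (fun x => !PySem.Set.contains [y] x)).length ≤ UB.length :=
          List.length_filter_le _ _
        have h2 : UB.length ≤ ((pvEdgePairs graph_adj).map (·.2)).length :=
          (List.dedup_sublist _).length_le
        have h3 : ((pvEdgePairs graph_adj).map (·.2)).length = pvEdges graph_adj := by
          rw [List.length_map, length_pvEdgePairs]
        simp only [List.length_cons, List.length_nil]
        omega
      exact rbLoop_complete (buildPreds graph_adj) t y UB hUnd hsub (pvGetNs graph_adj)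
        (fun u' w hw => (mem_predsOf_iff graph_adj hk u' w).mpr hw)
        _ [y] [y] (by simp) (fun x hx => hx) (by simp)
        (fun x hx => Or.inl hx) hfuel c u hsteps hyu
theorem cond_eq (graph_adj : List (String × List String))
    (hk : (graph_adj.map Prod.fst).Nodup) (t y c : String) :
    exists_directed_path_without c y t graph_adj
      = PySem.Set.contains (rbLoop (buildPreds graph_adj) t y (pvEdges graph_adj + 2) [y] (PySem.Set.ofList [y])) c := by
  rw [Bool.eq_iff_iff, ep_iff graph_adj y t c, reach_iff graph_adj hk t y c]
-- ===== VERDICT (by name: the statement is the Claim_ definition above) =====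
theorem find_c_total_spec : Claim_equal_find_c_total := by
  intro graph graph_adj t y _hdom hpre
  show find_c_total graph graph_adj t y = find_c_total_alt graph graph_adj t y
  unfold find_c_total find_c_total_alt
  have hf : (fun (acc : PySem.Set String) (c : String) =>
      if exists_directed_path_without c y t graph_adj then PySem.Set.add acc c else acc)
    = (fun (acc : PySem.Set String) (c : String) =>
      if PySem.Set.contains (rbLoop (buildPreds graph_adj) t y (pvEdges graph_adj + 2) [y] (PySem.Set.ofList [y])) c then PySem.Set.add acc c else acc) := by
    funext acc c
    rw [cond_eq graph_adj hpre t y c]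
  simp only [hf]
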